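-- pv_equiv track=rewrite | github.com/tungnhs2014/28tech_python | Learns/Bai_41/Bai_29.py | check
-- ===== SOURCE A (Python) =====
-- def check(n):
--     temp = n
--     rev = 0
--     tong = 0
--     ok = False
--     while n != 0:
--         rev = rev * 10 + n % 10
--         if n % 10 == 6:
--             ok = True
--         tong += n % 10
--         n //= 10
--     return ok and (temp == rev) and (tong % 10 == 8)
-- ===== SOURCE B (Python) =====
-- def check(n):
--     s = str(n)
--     return '6' in s and s == s[::-1] and sum(int(c) for c in s) % 10 == 8
-- ===== Notes on version B (the rewrite author's own statement) =====
-- stated objective: idiomatic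
-- what changed: Replaces the arithmetic while-loop that builds a reversed number, digit sum and digit-6 flag with direct tests on the decimal string: '6' in s, s == s[::-1], and sum(int(c) for c in s) % 10 == 8.
import Mathlib
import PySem

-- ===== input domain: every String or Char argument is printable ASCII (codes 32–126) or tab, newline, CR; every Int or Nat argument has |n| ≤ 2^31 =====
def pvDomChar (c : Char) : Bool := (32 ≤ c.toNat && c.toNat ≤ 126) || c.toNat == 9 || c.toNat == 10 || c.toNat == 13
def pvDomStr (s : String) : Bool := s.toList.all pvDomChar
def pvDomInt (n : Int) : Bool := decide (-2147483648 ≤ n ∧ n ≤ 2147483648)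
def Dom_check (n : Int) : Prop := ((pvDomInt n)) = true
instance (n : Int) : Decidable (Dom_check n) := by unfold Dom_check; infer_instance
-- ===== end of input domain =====

-- B replaces A's arithmetic reverse/sum/flag loop by direct tests on the decimal string (idiomatic; same cost).
-- A infinite-loops on negative n (n //= 10 stalls at -1), so Pre_ restricts to 0 ≤ n.

-- ===== PORT A =====
-- the while loop; fuel only makes the recursion total (n.natAbs+1 steps always suffice on 0 ≤ n)
def checkLoop : Nat → Int → Int → Int → Bool → Int × Int × Bool
  | 0, _, rev, tong, ok => (rev, tong, ok)
  | fuel+1, n, rev, tong, ok =>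
    if n ≠ 0 then
      checkLoop fuel (PySem.Int.floordiv n 10)
        (rev * 10 + PySem.Int.mod n 10)
        (tong + PySem.Int.mod n 10)
        (if PySem.Int.mod n 10 = 6 then true else ok)
    else (rev, tong, ok)

def check (n : Int) : Bool :=
  let temp := n
  let r := checkLoop (n.natAbs + 1) n 0 0 false
  r.2.2 && (temp == r.1) && (PySem.Int.mod r.2.1 10 == 8)

-- ===== PORT B =====
-- s = str(n) ported via PySem.Int.toChars (the List Char side of PySem.Int.toStr);
-- '6' in s is list membership; s == s[::-1] is comparison with List.reverse;
-- int(c) on a single decimal digit char is exactly (c.toNat : Int) - 48.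
def check_alt (n : Int) : Bool :=
  let s := PySem.Int.toChars n
  decide ('6' ∈ s) && (s == s.reverse)
    && (PySem.Int.mod (s.foldl (fun a c => a + ((c.toNat : Int) - 48)) 0) 10 == 8)

-- ===== PRECONDITION & SPEC =====
-- Pre_ excludes negative n, on which Python A never terminates (n //= 10 stalls at -1).
def Pre_check (n : Int) : Prop := 0 ≤ n
instance (n : Int) : Decidable (Pre_check n) := by unfold Pre_check; infer_instance
def pvWitness_check : Int := (868)

def Spec_check (n : Int) (out : Bool) : Prop := out = check_alt n
instance (n : Int) (out : Bool) : Decidable (Spec_check n out) := by unfold Spec_check; infer_instance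

-- ===== CLAIM (what is proved, stated in full; the proofs are below) =====
def Claim_equal_check : Prop := ∀ (n : Int), Dom_check n → Pre_check n → Spec_check n (check n)

-- ===== LEMMAS AND PROOFS =====

-- A's loop on a nonnegative input, characterised by the little-endian digit list
theorem checkLoop_digits (m : Nat) : ∀ (fuel : Nat), m < fuel → ∀ (rev tong : Int) (ok : Bool),
    checkLoop fuel (m : Int) rev tong ok =
      ((Nat.digits 10 m).foldl (fun (r : Int) (d : Nat) => r * 10 + (d : Int)) rev,
       tong + ((Nat.digits 10 m).sum : Int),
       ok || decide (6 ∈ Nat.digits 10 m)) := by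
  induction m using Nat.strong_induction_on with
  | _ m ih =>
    intro fuel hf rev tong ok
    match fuel, hf with
    | fuel+1, hf =>
      rcases Nat.eq_zero_or_pos m with hm | hm
      · subst hm; simp [checkLoop]
      · have hne : (m : Int) ≠ 0 := by exact_mod_cast hm.ne'
        rw [checkLoop, if_pos hne]
        have h10 : PySem.Int.floordiv (m : Int) 10 = ((m / 10 : Nat) : Int) := by
          exact_mod_cast PySem.Int.floordiv_natCast m 10
        have hmod : PySem.Int.mod (m : Int) 10 = ((m % 10 : Nat) : Int) := by
          exact_mod_cast PySem.Int.mod_natCast m 10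
        have hlt : m / 10 < fuel :=
          lt_of_lt_of_le (Nat.div_lt_self hm (by norm_num)) (Nat.lt_succ_iff.mp hf)
        rw [h10, hmod, ih (m / 10) (Nat.div_lt_self hm (by norm_num)) fuel hlt]
        rw [Nat.digits_def' (by norm_num : (1:ℕ) < 10) hm]
        simp only [List.foldl_cons, List.sum_cons, List.mem_cons]
        refine Prod.ext rfl (Prod.ext ?_ ?_)
        · push_cast; ring
        · rcases eq_or_ne (m % 10) 6 with h6 | h6
          · have heq6 : (m : Int) % 10 = 6 := by omega
            simp [heq6, h6]
          · have hne6 : ¬ ((m : Int) % 10 = 6) := by omega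
            simp [hne6, h6, Ne.symm h6]

-- the reversing foldl computes ofDigits of the reversed list
theorem foldl_rev_eq_ofDigits (L : List ℕ) : ∀ (a : Int),
    L.foldl (fun (r : Int) (d : Nat) => r * 10 + (d : Int)) a =
      ((Nat.ofDigits 10 L.reverse : ℕ) : ℤ) + a * 10 ^ L.length := by
  induction L with
  | nil => intro a; simp [Nat.ofDigits_nil]
  | cons d L ih =>
    intro a
    rw [List.foldl_cons, ih, List.reverse_cons, Nat.ofDigits_append]
    push_cast [Nat.ofDigits_singleton]
    simp only [List.length_reverse, List.length_cons]
    ring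

theorem digitChar_eq_six : ∀ d < 10, (Nat.digitChar d = '6' ↔ d = 6) := by decide

theorem digitChar_val : ∀ d < 10, ((Nat.digitChar d).toNat : Int) - 48 = (d : Int) := by decide

theorem digitChar_inj10 : ∀ d < 10, ∀ e < 10, Nat.digitChar d = Nat.digitChar e → d = e := by
  decide

theorem map_digitChar_inj : ∀ (L1 L2 : List ℕ), (∀ x ∈ L1, x < 10) → (∀ x ∈ L2, x < 10) →
    L1.map Nat.digitChar = L2.map Nat.digitChar → L1 = L2 := by
  intro L1
  induction L1 with
  | nil => intro L2 _ _ h; cases L2 <;> simp_all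
  | cons d L ih =>
    intro L2 h1 h2 h
    cases L2 with
    | nil => simp_all
    | cons e L2' =>
      simp only [List.map_cons, List.cons.injEq] at h
      have hd : d < 10 := h1 d (by simp)
      have he : e < 10 := h2 e (by simp)
      have hde : d = e := digitChar_inj10 d hd e he h.1
      rw [hde, ih L2' (fun x hx => h1 x (by simp [hx])) (fun x hx => h2 x (by simp [hx])) h.2]

-- toDigitsCore, characterised by Nat.digits
theorem toDigitsCore_eq (m : Nat) : ∀ (fuel : Nat), m < fuel → 0 < m → ∀ (ds : List Char),
    Nat.toDigitsCore 10 fuel m ds =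
      ((Nat.digits 10 m).map Nat.digitChar).reverse ++ ds := by
  induction m using Nat.strong_induction_on with
  | _ m ih =>
    intro fuel hf hm ds
    match fuel, hf with
    | fuel+1, hf =>
      rw [Nat.toDigitsCore]
      rw [Nat.digits_def' (by norm_num : (1:ℕ) < 10) hm]
      rcases Nat.eq_zero_or_pos (m / 10) with h0 | h0
      · rw [if_pos h0, h0]
        simp
      · rw [if_neg h0.ne']
        have hlt : m / 10 < fuel :=
          lt_of_lt_of_le (Nat.div_lt_self hm (by norm_num)) (Nat.lt_succ_iff.mp hf)
        rw [ih (m / 10) (Nat.div_lt_self hm (by norm_num)) fuel hlt h0]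
        simp

theorem toChars_pos {m : Nat} (hm : 0 < m) :
    PySem.Int.toChars (m : Int) = ((Nat.digits 10 m).map Nat.digitChar).reverse := by
  rw [PySem.Int.toChars, if_neg (not_lt.mpr (Int.natCast_nonneg m))]
  rw [Int.toNat_natCast, Nat.toDigits, toDigitsCore_eq m (m + 1) (Nat.lt_succ_self m) hm]
  simp

-- palindrome: m equals its digit-reversal iff the digit list is a palindrome
theorem rev_eq_iff {m : Nat} (hm : 0 < m) :
    m = Nat.ofDigits 10 (Nat.digits 10 m).reverse ↔
      (Nat.digits 10 m).reverse = Nat.digits 10 m := by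
  constructor
  · intro h
    set L := Nat.digits 10 m with hL
    have hLne : L ≠ [] := Nat.digits_ne_nil_iff_ne_zero.mpr hm.ne'
    have hrne : L.reverse ≠ [] := by simpa using hLne
    obtain ⟨d, t, hdt⟩ := List.exists_cons_of_ne_nil hrne
    have hdlt : d < 10 := Nat.digits_lt_base (by norm_num)
      (List.mem_reverse.mp (by rw [hdt]; exact List.mem_cons_self ..))
    have hmod : m % 10 = d := by
      rw [h, hdt]
      simp only [Nat.ofDigits_cons]
      omega
    -- d is the last digit of L, hence nonzero
    have hLrw : L = t.reverse ++ [d] := by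
      rw [← List.reverse_reverse L, hdt, List.reverse_cons]
    have hgl : L.getLast? = some d := by rw [hLrw]; simp
    have hdne : d ≠ 0 := by
      have h4 := List.getLast?_eq_some_getLast (l := Nat.digits 10 m)
        (Nat.digits_ne_nil_iff_ne_zero.mpr hm.ne')
      have h5 : (Nat.digits 10 m).getLast (Nat.digits_ne_nil_iff_ne_zero.mpr hm.ne') = d :=
        Option.some_inj.mp (h4.symm.trans hgl)
      rw [← h5]
      exact Nat.getLast_digit_ne_zero 10 hm.ne' 
    -- head of L = m % 10 = d ≠ 0, so the reversed list has nonzero last digit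
    have hh : L.head? = some (m % 10) := by
      rw [hL, Nat.digits_def' (by norm_num : (1:ℕ) < 10) hm]
      rfl
    have hlast' : ∀ (h' : L.reverse ≠ []), L.reverse.getLast h' ≠ 0 := by
      intro h'
      rw [List.getLast_reverse]
      have h5 := List.head?_eq_some_head hLne
      rw [hh] at h5
      rw [← Option.some_inj.mp h5, hmod]
      exact hdne
    have hlt' : ∀ x ∈ L.reverse, x < 10 := fun x hx =>
      Nat.digits_lt_base (by norm_num) (List.mem_reverse.mp hx)
    have hdig := Nat.digits_ofDigits 10 (by norm_num) L.reverse hlt' hlast'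
    rw [← h, ← hL] at hdig
    exact hdig.symm
  · intro h
    conv_lhs => rw [← Nat.ofDigits_digits 10 m, ← h]

theorem sum_digit_chars (L : List ℕ) (h : ∀ x ∈ L, x < 10) :
    (L.map ((fun c => ((c.toNat : Int) - 48)) ∘ Nat.digitChar)).sum = (L.sum : Int) := by
  induction L with
  | nil => simp
  | cons d t ih =>
    simp only [List.map_cons, List.sum_cons, Function.comp]
    rw [digitChar_val d (h d (by simp)), ih (fun x hx => h x (by simp [hx]))]
    push_cast
    ring

-- sum via foldl over the char list
theorem foldl_sum_chars (cs : List Char) : ∀ (a : Int),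
    cs.foldl (fun a c => a + ((c.toNat : Int) - 48)) a =
      a + (cs.map (fun c => ((c.toNat : Int) - 48))).sum := by
  induction cs with
  | nil => intro a; simp
  | cons c cs ih => intro a; simp [ih]; ring

-- ===== VERDICT (by name: the statement is the Claim_ definition above) =====
theorem check_spec : Claim_equal_check := by
  intro n _ hpre
  unfold Spec_check check check_alt
  obtain ⟨m, rfl⟩ := Int.eq_ofNat_of_zero_le hpre
  rcases Nat.eq_zero_or_pos m with hm | hm
  · subst hm; decide
  · have hfuel : m < (m : Int).natAbs + 1 := by simp
    rw [checkLoop_digits m ((m : Int).natAbs + 1) hfuel 0 0 false]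
    rw [toChars_pos hm]
    set L := Nat.digits 10 m with hL
    have hlt : ∀ x ∈ L, x < 10 := fun x hx => Nat.digits_lt_base (by norm_num) hx
    simp only [foldl_rev_eq_ofDigits, foldl_sum_chars, zero_mul, add_zero, zero_add]
    -- condition 1: digit 6
    have c1 : (false || decide (6 ∈ L)) = decide ('6' ∈ (L.map Nat.digitChar).reverse) := by
      simp only [Bool.false_or, decide_eq_decide, List.mem_reverse, List.mem_map]
      constructor
      · intro h6; exact ⟨6, h6, by decide⟩
      · rintro ⟨x, hx, hc⟩
        exact (digitChar_eq_six x (hlt x hx)).mp hc ▸ hx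
    -- condition 2: palindrome
    have c2 : ((m : Int) == ((Nat.ofDigits 10 L.reverse : ℕ) : ℤ)) =
        ((L.map Nat.digitChar).reverse == ((L.map Nat.digitChar).reverse).reverse) := by
      rw [Bool.eq_iff_iff]
      simp only [beq_iff_eq, List.reverse_reverse, Nat.cast_inj]
      rw [hL, rev_eq_iff hm, ← hL]
      constructor
      · intro h
        rw [← List.map_reverse, h]
      · intro h
        rw [← List.map_reverse] at h
        exact map_digitChar_inj L.reverse L
          (fun x hx => hlt x (List.mem_reverse.mp hx)) hlt h
    -- condition 3: digit sum
    have c3 : ((L.map Nat.digitChar).reverse.map (fun c => ((c.toNat : Int) - 48))).sum =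
        ((L.sum : Nat) : Int) := by
      rw [List.map_reverse, List.sum_reverse, List.map_map]
      exact sum_digit_chars L hlt
    rw [c1, c2, c3]
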